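-- pv_equiv track=rewrite | github.com/pypi-data/pypi-mirror-396 | packages/heapx/heapx-0.0.3.tar.gz/heapx-0.0.3/tests/test_heapify.py | is_valid_heap
-- ===== SOURCE A (Python) =====
-- from   typing     import List, Any, Tuple
--
-- def is_valid_heap(arr: List[Any], max_heap: bool = False, arity: int = 2) -> bool:
--   """Verify heap property for n-ary heap."""
--   n = len(arr)
--   for i in range(n):
--     for j in range(1, arity + 1):
--       child = arity * i + j
--       if child >= n:
--         break
--       if max_heap:
--         if arr[i] < arr[child]:
--           return False
--       else:
--         if arr[i] > arr[child]:
--           return False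
--   return True
-- ===== SOURCE B (Python) =====
-- def is_valid_heap(arr, max_heap=False, arity=2):
--     """Verify heap property for n-ary heap (flat loop over child indices)."""
--     n = len(arr)
--     if arity < 1:
--         return True
--     for c in range(1, n):
--         p = (c - 1) // arity
--         if (arr[p] < arr[c]) if max_heap else (arr[p] > arr[c]):
--             return False
--     return True
-- ===== Notes on version B (the rewrite author's own statement) =====
-- stated objective: alternative
-- what changed: Replaces A's nested parent-then-children loops (with an inner break) by a single flat loop over child indices c=1..n-1 that computes each child's parent as (c-1)//arity, guarded by 'arity < 1: return True' to cover A's empty inner range.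
import Mathlib
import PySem

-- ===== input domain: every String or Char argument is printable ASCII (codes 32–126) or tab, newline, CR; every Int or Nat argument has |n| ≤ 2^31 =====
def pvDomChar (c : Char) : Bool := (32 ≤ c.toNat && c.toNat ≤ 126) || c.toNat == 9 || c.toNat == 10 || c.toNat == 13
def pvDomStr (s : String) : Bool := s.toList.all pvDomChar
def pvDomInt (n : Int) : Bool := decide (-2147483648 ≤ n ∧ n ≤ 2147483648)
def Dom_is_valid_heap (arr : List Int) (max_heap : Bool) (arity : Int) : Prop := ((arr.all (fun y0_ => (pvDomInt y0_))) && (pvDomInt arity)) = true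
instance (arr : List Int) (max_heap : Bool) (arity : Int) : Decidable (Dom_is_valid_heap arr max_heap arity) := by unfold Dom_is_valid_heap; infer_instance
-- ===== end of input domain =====

-- B re-decomposes A's nested parent→children loops as a single flat loop over child
-- indices c=1..n-1 comparing arr[(c-1)//arity] with arr[c]; same return value everywhere.

-- ===== PORT A =====
-- inner 'for j in range(1, arity+1)', iterated lazily on the counter j as Python's range is:
-- true = inner loop finished/broke, false = 'return False'
def pvInnerA (arr : List Int) (max_heap : Bool) (arity n i j : Int) : Bool :=
  if hj : j ≤ arity then
    let child := arity * i + j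
    if child ≥ n then true
    else if max_heap then
      if PySem.List.pyGetD arr i 0 < PySem.List.pyGetD arr child 0 then false
      else pvInnerA arr max_heap arity n i (j + 1)
    else
      if PySem.List.pyGetD arr i 0 > PySem.List.pyGetD arr child 0 then false
      else pvInnerA arr max_heap arity n i (j + 1)
  else true
termination_by (arity + 1 - j).toNat
decreasing_by all_goals omega

-- outer 'for i in range(n)'
def pvOuterA (arr : List Int) (max_heap : Bool) (arity n : Int) : List Int → Bool
  | [] => true
  | i :: is =>
    if pvInnerA arr max_heap arity n i 1 then
      pvOuterA arr max_heap arity n is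
    else false

def is_valid_heap (arr : List Int) (max_heap : Bool) (arity : Int) : Bool :=
  let n : Int := arr.length
  pvOuterA arr max_heap arity n (PySem.List.pyRange 0 n 1)

-- ===== PORT B =====
-- 'for c in range(1, n)'
def pvLoopB (arr : List Int) (max_heap : Bool) (arity : Int) : List Int → Bool
  | [] => true
  | c :: cs =>
    let p := PySem.Int.floordiv (c - 1) arity
    if (if max_heap then PySem.List.pyGetD arr p 0 < PySem.List.pyGetD arr c 0
        else PySem.List.pyGetD arr p 0 > PySem.List.pyGetD arr c 0) then false
    else pvLoopB arr max_heap arity cs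

def is_valid_heap_alt (arr : List Int) (max_heap : Bool) (arity : Int) : Bool :=
  let n : Int := arr.length
  if arity < 1 then true
  else pvLoopB arr max_heap arity (PySem.List.pyRange 1 n 1)

-- ===== PRECONDITION & SPEC =====
def Spec_is_valid_heap (arr : List Int) (max_heap : Bool) (arity : Int) (out : Bool) : Prop := out = is_valid_heap_alt arr max_heap arity
instance (arr : List Int) (max_heap : Bool) (arity : Int) (out : Bool) : Decidable (Spec_is_valid_heap arr max_heap arity out) := by unfold Spec_is_valid_heap; infer_instance

-- ===== CLAIM (what is proved, stated in full; the proofs are below) =====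
def Claim_equal_is_valid_heap : Prop := ∀ (arr : List Int) (max_heap : Bool) (arity : Int), Dom_is_valid_heap arr max_heap arity → Spec_is_valid_heap arr max_heap arity (is_valid_heap arr max_heap arity)

-- ===== LEMMAS AND PROOFS =====

-- the comparison that makes A/B return False, at parent p and child c
def pvBad (arr : List Int) (max_heap : Bool) (p c : Int) : Bool :=
  if max_heap then decide (PySem.List.pyGetD arr p 0 < PySem.List.pyGetD arr c 0)
  else decide (PySem.List.pyGetD arr p 0 > PySem.List.pyGetD arr c 0)

theorem pvLoopB_all (arr : List Int) (mh : Bool) (arity : Int) (cs : List Int) :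
    pvLoopB arr mh arity cs =
      cs.all (fun c => !pvBad arr mh (PySem.Int.floordiv (c - 1) arity) c) := by
  induction cs with
  | nil => rfl
  | cons c cs ih =>
    simp only [pvLoopB, pvBad, List.all_cons, ih]
    by_cases hm : mh <;> simp [hm]

-- proof-side list-based rendering of A's inner loop
def pvInnerAL (arr : List Int) (max_heap : Bool) (arity n i : Int) : List Int → Bool
  | [] => true
  | j :: js =>
    let child := arity * i + j
    if child ≥ n then true
    else if max_heap then
      if PySem.List.pyGetD arr i 0 < PySem.List.pyGetD arr child 0 then false
      else pvInnerAL arr max_heap arity n i js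
    else
      if PySem.List.pyGetD arr i 0 > PySem.List.pyGetD arr child 0 then false
      else pvInnerAL arr max_heap arity n i js

theorem pvInnerA_eq_list (arr : List Int) (mh : Bool) (arity n i : Int) :
    ∀ (k : Nat) (j : Int), (arity + 1 - j).toNat ≤ k →
      pvInnerA arr mh arity n i j = pvInnerAL arr mh arity n i (PySem.List.pyRange j (arity + 1) 1) := by
  intro k
  induction k with
  | zero =>
    intro j hk
    rw [pvInnerA, dif_neg (by omega), PySem.List.pyRange_one_eq_nil (by omega)]
    rfl
  | succ k ih =>
    intro j hk
    by_cases hj : j ≤ arity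
    · rw [pvInnerA, dif_pos hj, PySem.List.pyRange_one_cons (by omega)]
      simp only [pvInnerAL]
      rw [ih (j + 1) (by omega)]
    · rw [pvInnerA, dif_neg hj, PySem.List.pyRange_one_eq_nil (by omega)]
      rfl

theorem pvInnerA_all (arr : List Int) (mh : Bool) (arity n i : Int) (js : List Int)
    (hmono : js.Pairwise (· ≤ ·)) :
    pvInnerAL arr mh arity n i js =
      js.all (fun j => decide (arity * i + j ≥ n) || !pvBad arr mh i (arity * i + j)) := by
  induction js with
  | nil => rfl
  | cons j js ih =>
    rcases List.pairwise_cons.mp hmono with ⟨hle, hrest⟩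
    by_cases hge : arity * i + j ≥ n
    · simp only [pvInnerAL, if_pos hge, List.all_cons]
      have : js.all (fun j' => decide (arity * i + j' ≥ n) || !pvBad arr mh i (arity * i + j')) = true := by
        rw [List.all_eq_true]; intro j' hj'
        have := hle j' hj'
        simp only [Bool.or_eq_true, decide_eq_true_eq]
        left; omega
      simp [hge, this]
    · simp only [pvInnerAL, if_neg hge, List.all_cons, ih hrest, pvBad]
      by_cases hm : mh <;> simp [hm, hge]

theorem pvOuterA_all (arr : List Int) (mh : Bool) (arity n : Int) (is : List Int) :
    pvOuterA arr mh arity n is =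
      is.all (fun i => pvInnerA arr mh arity n i 1) := by
  induction is with
  | nil => rfl
  | cons i is ih => simp only [pvOuterA, List.all_cons, ih]; split_ifs <;> simp_all

theorem pvA_char (arr : List Int) (mh : Bool) (arity : Int) :
    is_valid_heap arr mh arity = true ↔
      ∀ i : Int, 0 ≤ i → i < (arr.length : Int) →
        ∀ j : Int, 1 ≤ j → j ≤ arity → arity * i + j < (arr.length : Int) →
          pvBad arr mh i (arity * i + j) = false := by
  have hmono : (PySem.List.pyRange 1 (arity + 1) 1).Pairwise (· ≤ ·) :=
    (PySem.List.pairwise_lt_pyRange_one 1 (arity + 1)).imp (fun h => le_of_lt h)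
  unfold is_valid_heap
  rw [pvOuterA_all, List.all_eq_true]
  constructor
  · intro h i hi0 hin j hj1 hja hc
    have hmem : i ∈ PySem.List.pyRange 0 (arr.length : Int) 1 := by
      rw [PySem.List.mem_pyRange_one]; omega
    have := h i hmem
    rw [pvInnerA_eq_list arr mh arity _ i (arity + 1 - 1).toNat 1 (by omega),
        pvInnerA_all arr mh arity _ i _ hmono, List.all_eq_true] at this
    have hjm : j ∈ PySem.List.pyRange 1 (arity + 1) 1 := by
      rw [PySem.List.mem_pyRange_one]; omega
    have := this j hjm
    simp only [Bool.or_eq_true, decide_eq_true_eq, Bool.not_eq_true'] at this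
    rcases this with h' | h'
    · omega
    · exact h'
  · intro h i hmem
    rw [PySem.List.mem_pyRange_one] at hmem
    rw [pvInnerA_eq_list arr mh arity _ i (arity + 1 - 1).toNat 1 (by omega),
        pvInnerA_all arr mh arity _ i _ hmono, List.all_eq_true]
    intro j hjm
    rw [PySem.List.mem_pyRange_one] at hjm
    simp only [Bool.or_eq_true, decide_eq_true_eq, Bool.not_eq_true']
    by_cases hc : arity * i + j ≥ (arr.length : Int)
    · left; exact hc
    · right; exact h i hmem.1 hmem.2 j hjm.1 (by omega) (by omega)

theorem pvB_char (arr : List Int) (mh : Bool) (arity : Int) (h1 : 1 ≤ arity) :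
    is_valid_heap_alt arr mh arity = true ↔
      ∀ c : Int, 1 ≤ c → c < (arr.length : Int) →
        pvBad arr mh (PySem.Int.floordiv (c - 1) arity) c = false := by
  unfold is_valid_heap_alt
  rw [if_neg (by omega), pvLoopB_all, List.all_eq_true]
  constructor
  · intro h c hc1 hcn
    have := h c (by rw [PySem.List.mem_pyRange_one]; omega)
    simpa using this
  · intro h c hmem
    rw [PySem.List.mem_pyRange_one] at hmem
    simpa using h c hmem.1 hmem.2

-- floordiv of the child index recovers the parent
theorem pvParent_eq (arity i j : Int) (h1 : 1 ≤ arity) (hj1 : 1 ≤ j) (hja : j ≤ arity) :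
    PySem.Int.floordiv (arity * i + j - 1) arity = i := by
  rw [PySem.Int.floordiv_eq_iff_of_pos (by omega)]
  constructor <;> nlinarith

-- bounds for the parent computed from a child index
theorem pvParent_bounds (arity c : Int) (h1 : 1 ≤ arity) (hc1 : 1 ≤ c) :
    let p := PySem.Int.floordiv (c - 1) arity
    0 ≤ p ∧ p * arity ≤ c - 1 ∧ c - 1 < (p + 1) * arity := by
  intro p
  have hp : PySem.Int.floordiv (c - 1) arity = p := rfl
  rw [PySem.Int.floordiv_eq_iff_of_pos (by omega)] at hp
  refine ⟨?_, hp.1, hp.2⟩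
  by_contra hneg
  push_neg at hneg
  nlinarith [hp.2]

theorem pv_main (arr : List Int) (mh : Bool) (arity : Int) :
    is_valid_heap arr mh arity = is_valid_heap_alt arr mh arity := by
  by_cases h1 : arity < 1
  · -- inner range is empty in A; B returns true by its guard
    have hA : is_valid_heap arr mh arity = true := by
      unfold is_valid_heap
      rw [pvOuterA_all, List.all_eq_true]
      intro i _
      rw [pvInnerA, dif_neg (by omega)]
    have hB : is_valid_heap_alt arr mh arity = true := by
      unfold is_valid_heap_alt; rw [if_pos h1]
    rw [hA, hB]
  · push_neg at h1
    -- prove the two Prop characterisations equivalent, then transfer to Bool equality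
    have key : (∀ i : Int, 0 ≤ i → i < (arr.length : Int) →
        ∀ j : Int, 1 ≤ j → j ≤ arity → arity * i + j < (arr.length : Int) →
          pvBad arr mh i (arity * i + j) = false) ↔
        (∀ c : Int, 1 ≤ c → c < (arr.length : Int) →
          pvBad arr mh (PySem.Int.floordiv (c - 1) arity) c = false) := by
      constructor
      · intro hA c hc1 hcn
        obtain ⟨hp0, hlo, hhi⟩ := pvParent_bounds arity c h1 hc1
        set p := PySem.Int.floordiv (c - 1) arity with hp
        have hpn : p < (arr.length : Int) := by nlinarith
        have hj1 : 1 ≤ c - arity * p := by nlinarith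
        have hja : c - arity * p ≤ arity := by nlinarith
        have := hA p hp0 hpn (c - arity * p) hj1 hja (by omega)
        simpa using this
      · intro hB i hi0 hin j hj1 hja hc
        have hc1 : 1 ≤ arity * i + j := by nlinarith
        have := hB (arity * i + j) hc1 hc
        rwa [pvParent_eq arity i j h1 hj1 hja] at this
    rcases Bool.eq_false_or_eq_true (is_valid_heap arr mh arity) with ha | ha <;>
      rcases Bool.eq_false_or_eq_true (is_valid_heap_alt arr mh arity) with hb | hb
    · rw [ha, hb]
    · exfalso
      have := (pvB_char arr mh arity h1).mpr (key.mp ((pvA_char arr mh arity).mp ha))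
      rw [hb] at this; exact Bool.false_ne_true this
    · exfalso
      have := (pvA_char arr mh arity).mpr (key.mpr ((pvB_char arr mh arity h1).mp hb))
      rw [ha] at this; exact Bool.false_ne_true this
    · rw [ha, hb]

-- ===== VERDICT (by name: the statement is the Claim_ definition above) =====
theorem is_valid_heap_spec : Claim_equal_is_valid_heap := by
  intro arr mh arity _
  unfold Spec_is_valid_heap
  exact pv_main arr mh arity
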